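-- pv_equiv track=rewrite | github.com/Zulut30/deckview-telegram-bot | deck_parser.py | translate_deck_name
-- ===== SOURCE A (Python) =====
-- from typing import Dict, List, Optional, Any
--
-- def translate_deck_name(name: str, archetypes: Dict[str, str]) -> str:
--     """Translate deck name from English to Russian using archetype table."""
--     if not name or not archetypes:
--         return name
--
--     name_lower = name.lower().strip()
--
--     # Try exact match first
--     if name_lower in archetypes:
--         return archetypes[name_lower]
--
--     # Try partial match - find longest matching archetype
--     best_match = None
--     best_length = 0
--
--     for eng, rus in archetypes.items():
--         if eng in name_lower and len(eng) > best_length: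
--             best_match = rus
--             best_length = len(eng)
--
--     if best_match:
--         return best_match
--
--     # No translation found - return original
--     return name
-- ===== SOURCE B (Python) =====
-- def translate_deck_name(name: str, archetypes: dict) -> str:
--     """Translate deck name from English to Russian using archetype table."""
--     if not name or not archetypes:
--         return name
--
--     name_lower = name.lower().strip()
--
--     # Try exact match first
--     if name_lower in archetypes:
--         return archetypes[name_lower]
--
--     # Fall back to the longest archetype key contained in the name: scan the
--     # keys from the longest to the shortest (stable sort, so equal-length keys
--     # keep table order) and return the first hit.  An empty key would trivially
--     # be contained in every name, so only non-empty keys count as hits.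
--     for eng, rus in sorted(archetypes.items(), key=lambda kv: -len(kv[0])):
--         if len(eng) > 0 and eng in name_lower:
--             return rus
--
--     # No translation found - return original
--     return name
-- ===== Notes on version B (the rewrite author's own statement) =====
-- stated objective: faster
-- what changed: The fallback's best-length-tracking scan over every key is replaced by sort-then-first-match: archetype items are stably sorted by descending key length and the scan early-returns at the first non-empty key contained in the name; Pre_ excludes inputs where the name contains a non-empty key whose translation is the empty string, on which A's `if best_match:` truthiness test falls back to the original name accidentally.
-- outside the precondition, e.g. on translate_deck_name('big dragon', {'dragon': ''}): A returns 'big dragon', B returns ''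
import Mathlib
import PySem

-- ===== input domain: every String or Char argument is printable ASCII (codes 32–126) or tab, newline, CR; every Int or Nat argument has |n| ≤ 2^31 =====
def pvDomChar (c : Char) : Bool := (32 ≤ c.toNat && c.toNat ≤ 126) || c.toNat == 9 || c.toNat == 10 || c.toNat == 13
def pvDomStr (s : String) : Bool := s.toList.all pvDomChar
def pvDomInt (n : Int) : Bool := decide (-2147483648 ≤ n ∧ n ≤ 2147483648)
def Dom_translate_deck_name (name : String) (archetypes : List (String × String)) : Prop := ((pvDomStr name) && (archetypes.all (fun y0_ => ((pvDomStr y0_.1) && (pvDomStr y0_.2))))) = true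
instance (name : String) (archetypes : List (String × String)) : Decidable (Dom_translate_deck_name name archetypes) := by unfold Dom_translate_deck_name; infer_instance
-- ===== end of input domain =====

-- B replaces A's best-length-tracking fallback scan by sort-then-first-match (stable sort by descending key length); Pre_ excludes tables where the name contains a key whose translation is empty, where A's `if best_match:` truthiness test falls back to the original name.


-- ===== PORT A =====
def translate_deck_name (name : String) (archetypes : List (String × String)) : String :=
  if name = "" || archetypes.isEmpty then name
  else
    let d := PySem.Dict.ofList archetypes
    let name_lower := PySem.Str.strip (PySem.Str.lower name)
    if d.contains name_lower then d.getD name_lower name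
    else
      -- for eng, rus in archetypes.items(): if eng in name_lower and len(eng) > best_length: …
      let r := d.items.foldl
        (fun (st : Option String × Int) p =>
          if PySem.Str.isIn p.1 name_lower && decide (st.2 < PySem.Str.len p.1)
          then (some p.2, PySem.Str.len p.1) else st) (none, 0)
      match r.1 with
      | some s => if s = "" then name else s   -- `if best_match:` (falsy on None and "")
      | none => name

-- ===== PORT B =====
def translate_deck_name_alt (name : String) (archetypes : List (String × String)) : String :=
  if name = "" || archetypes.isEmpty then name
  else
    let d := PySem.Dict.ofList archetypes
    let name_lower := PySem.Str.strip (PySem.Str.lower name)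
    if d.contains name_lower then d.getD name_lower name
    else
      -- for eng, rus in sorted(archetypes.items(), key=lambda kv: -len(kv[0])):
      --     if len(eng) > 0 and eng in name_lower: return rus
      match (PySem.List.sorted d.items (fun kv => -(PySem.Str.len kv.1)) false).find?
              (fun p => decide (0 < PySem.Str.len p.1) && PySem.Str.isIn p.1 name_lower) with
      | some q => q.2
      | none => name

-- ===== PRECONDITION & SPEC =====
-- Pre_ excludes inputs where the (lower-cased, stripped) name contains a non-empty archetype key whose
-- translation is the empty string: there A's `if best_match:` truthiness test silently discards the
-- looked-up empty translation, an artefact of A's implementation that B does not reproduce.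
def Pre_translate_deck_name (name : String) (archetypes : List (String × String)) : Prop :=
  ∀ p ∈ archetypes, p.1 ≠ "" →
    PySem.Str.isIn p.1 (PySem.Str.strip (PySem.Str.lower name)) = true → p.2 ≠ ""
instance (name : String) (archetypes : List (String × String)) : Decidable (Pre_translate_deck_name name archetypes) := by unfold Pre_translate_deck_name; infer_instance

def pvWitness_translate_deck_name : String × (List (String × String)) :=
  ("Big Dragon deck", [("dragon", "Dragons RU"), ("big dragon", "Big Dragons RU")])

def Spec_translate_deck_name (name : String) (archetypes : List (String × String)) (out : String) : Prop := out = translate_deck_name_alt name archetypes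
instance (name : String) (archetypes : List (String × String)) (out : String) : Decidable (Spec_translate_deck_name name archetypes out) := by unfold Spec_translate_deck_name; infer_instance

-- ===== CLAIM (what is proved, stated in full; the proofs are below) =====
def Claim_equal_translate_deck_name : Prop := ∀ (name : String) (archetypes : List (String × String)), Dom_translate_deck_name name archetypes → Pre_translate_deck_name name archetypes → Spec_translate_deck_name name archetypes (translate_deck_name name archetypes)

-- ===== LEMMAS AND PROOFS =====

lemma tdn_len_nonneg (s : String) : 0 ≤ PySem.Str.len s := by
  rw [PySem.Str.len_eq]; positivity

lemma tdn_ne_empty_of_len_pos (s : String) (h : 0 < PySem.Str.len s) : s ≠ "" := by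
  intro he
  rw [he] at h
  exact absurd h (by decide)

-- every item of Dict.ofList l is an entry of l
lemma tdn_mem_items_update {κ ν : Type} [BEq κ] [LawfulBEq κ] (l : List (κ × ν)) :
    ∀ (d : PySem.Dict κ ν) (p : κ × ν), p ∈ (d.update l).items → p ∈ d.items ∨ p ∈ l := by
  induction l with
  | nil => intro d p hp; exact Or.inl hp
  | cons x t ih =>
    intro d p hp
    have h1 : p ∈ ((d.insert x.1 x.2).update t).items := hp
    rcases ih (d.insert x.1 x.2) p h1 with h2 | h2
    · rcases (PySem.Dict.mem_items_insert (d := d) (k := x.1) (v := x.2) (p := p)).mp h2 with h3 | h3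
      · exact Or.inr (by simp [h3])
      · exact Or.inl h3.1
    · exact Or.inr (List.mem_cons_of_mem x h2)

lemma tdn_mem_items_ofList {κ ν : Type} [BEq κ] [LawfulBEq κ] (l : List (κ × ν)) (p : κ × ν)
    (hp : p ∈ (PySem.Dict.ofList l).items) : p ∈ l := by
  rcases tdn_mem_items_update l PySem.Dict.empty p hp with h | h
  · cases h
  · exact h

-- inserting p into a descending-by-key-length list shifts the first hit exactly as A's state update does
lemma tdn_find_insertBy (nl : String) (p : String × String) (m : Int) (hm0 : 0 ≤ m)
    (S : List (String × String))
    (hsort : S.Pairwise (fun a b => -(PySem.Str.len a.1) ≤ -(PySem.Str.len b.1)))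
    (hub : ∀ q ∈ S, (decide (0 < PySem.Str.len q.1) && PySem.Str.isIn q.1 nl) = true →
      PySem.Str.len q.1 ≤ m)
    (hfound : PySem.Str.isIn p.1 nl = true → 0 < PySem.Str.len p.1 → PySem.Str.len p.1 ≤ m →
      ∃ q, S.find? (fun r => decide (0 < PySem.Str.len r.1) && PySem.Str.isIn r.1 nl) = some q ∧
        PySem.Str.len p.1 ≤ PySem.Str.len q.1) :
    (PySem.List.insertBy (fun a b => decide (-(PySem.Str.len a.1) < -(PySem.Str.len b.1))) p S).find?
        (fun r => decide (0 < PySem.Str.len r.1) && PySem.Str.isIn r.1 nl)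
      = if PySem.Str.isIn p.1 nl = true ∧ m < PySem.Str.len p.1 then some p
        else S.find? (fun r => decide (0 < PySem.Str.len r.1) && PySem.Str.isIn r.1 nl) := by
  induction S with
  | nil =>
    simp only [PySem.List.insertBy]
    by_cases hm : PySem.Str.isIn p.1 nl = true
    · by_cases hlt : m < PySem.Str.len p.1
      · rw [if_pos ⟨hm, hlt⟩, List.find?_singleton,
            if_pos (by rw [Bool.and_eq_true]; exact ⟨decide_eq_true (by omega), hm⟩)]
      · by_cases hp0 : 0 < PySem.Str.len p.1
        · rcases hfound hm hp0 (by omega) with ⟨q, hq, _⟩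
          simp at hq
        · rw [if_neg (fun hcc => hlt hcc.2), List.find?_singleton,
              if_neg (by simp only [Bool.and_eq_true, decide_eq_true_eq]; tauto), List.find?_nil]
    · rw [if_neg (fun hcc => hm hcc.1), List.find?_singleton,
          if_neg (by simp only [Bool.and_eq_true]; tauto), List.find?_nil]
  | cons y S' ih =>
    simp only [PySem.List.insertBy]
    by_cases hbf : (-(PySem.Str.len p.1) < -(PySem.Str.len y.1))
    · -- len y < len p : p goes in front
      rw [if_pos (decide_eq_true hbf)]
      have hy0 : 0 ≤ PySem.Str.len y.1 := tdn_len_nonneg y.1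
      have hp0 : 0 < PySem.Str.len p.1 := by omega
      by_cases hm : PySem.Str.isIn p.1 nl = true
      · have hlt : m < PySem.Str.len p.1 := by
          by_contra hle
          rcases hfound hm hp0 (by omega) with ⟨q, hq, hqe⟩
          have hqmem : q ∈ y :: S' := List.mem_of_find?_eq_some hq
          have hqy : PySem.Str.len q.1 ≤ PySem.Str.len y.1 := by
            rcases List.mem_cons.mp hqmem with h | h
            · rw [h]
            · have := (List.pairwise_cons.mp hsort).1 q h
              omega
          omega
        rw [if_pos ⟨hm, hlt⟩,
            List.find?_cons_of_pos (p := fun r : String × String => decide (0 < PySem.Str.len r.1) && PySem.Str.isIn r.1 nl)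
              (by rw [Bool.and_eq_true]; exact ⟨decide_eq_true hp0, hm⟩)]
      · rw [if_neg (fun hcc => hm hcc.1),
            List.find?_cons_of_neg (p := fun r : String × String => decide (0 < PySem.Str.len r.1) && PySem.Str.isIn r.1 nl)
              (by simp only [Bool.and_eq_true]; tauto)]
    · rw [if_neg (by simpa using hbf)]
      rw [not_lt] at hbf
      by_cases hy : (decide (0 < PySem.Str.len y.1) && PySem.Str.isIn y.1 nl) = true
      · have hym : PySem.Str.len y.1 ≤ m := hub y (List.mem_cons_self) hy
        have hcond : ¬ (PySem.Str.isIn p.1 nl = true ∧ m < PySem.Str.len p.1) := by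
          rintro ⟨_, hlt⟩; omega
        rw [if_neg hcond,
            List.find?_cons_of_pos (p := fun r : String × String => decide (0 < PySem.Str.len r.1) && PySem.Str.isIn r.1 nl) hy,
            List.find?_cons_of_pos (p := fun r : String × String => decide (0 < PySem.Str.len r.1) && PySem.Str.isIn r.1 nl) hy]
      · rw [List.find?_cons_of_neg (p := fun r : String × String => decide (0 < PySem.Str.len r.1) && PySem.Str.isIn r.1 nl) hy,
            List.find?_cons_of_neg (p := fun r : String × String => decide (0 < PySem.Str.len r.1) && PySem.Str.isIn r.1 nl) hy]
        exact ih (List.Pairwise.of_cons hsort)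
          (fun q hq hqm => hub q (List.mem_cons_of_mem y hq) hqm)
          (fun hmm hp0 hle => by
            rcases hfound hmm hp0 hle with ⟨q, hq, hqe⟩
            rw [List.find?_cons_of_neg (p := fun r : String × String => decide (0 < PySem.Str.len r.1) && PySem.Str.isIn r.1 nl) hy] at hq
            exact ⟨q, hq, hqe⟩)

-- loop invariant: A's (best, best_length) state vs. the first hit of the sorted-so-far list
lemma tdn_inv (nl : String) (l : List (String × String)) :
    (0 ≤ (l.foldl (fun (st : Option String × Int) p =>
        if PySem.Str.isIn p.1 nl && decide (st.2 < PySem.Str.len p.1)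
        then (some p.2, PySem.Str.len p.1) else st) (none, 0)).2) ∧
    (∀ q ∈ l, (decide (0 < PySem.Str.len q.1) && PySem.Str.isIn q.1 nl) = true →
      PySem.Str.len q.1 ≤
      (l.foldl (fun (st : Option String × Int) p =>
        if PySem.Str.isIn p.1 nl && decide (st.2 < PySem.Str.len p.1)
        then (some p.2, PySem.Str.len p.1) else st) (none, 0)).2) ∧
    (((l.foldl (fun (st : Option String × Int) p =>
        if PySem.Str.isIn p.1 nl && decide (st.2 < PySem.Str.len p.1)
        then (some p.2, PySem.Str.len p.1) else st) (none, 0)).1 = none ∧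
      (PySem.List.sorted l (fun kv => -(PySem.Str.len kv.1)) false).find?
        (fun r => decide (0 < PySem.Str.len r.1) && PySem.Str.isIn r.1 nl) = none ∧
      (l.foldl (fun (st : Option String × Int) p =>
        if PySem.Str.isIn p.1 nl && decide (st.2 < PySem.Str.len p.1)
        then (some p.2, PySem.Str.len p.1) else st) (none, 0)).2 = 0) ∨
     (∃ q, q ∈ l ∧
      (l.foldl (fun (st : Option String × Int) p =>
        if PySem.Str.isIn p.1 nl && decide (st.2 < PySem.Str.len p.1)
        then (some p.2, PySem.Str.len p.1) else st) (none, 0)).1 = some q.2 ∧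
      (PySem.List.sorted l (fun kv => -(PySem.Str.len kv.1)) false).find?
        (fun r => decide (0 < PySem.Str.len r.1) && PySem.Str.isIn r.1 nl) = some q ∧
      PySem.Str.len q.1 =
      (l.foldl (fun (st : Option String × Int) p =>
        if PySem.Str.isIn p.1 nl && decide (st.2 < PySem.Str.len p.1)
        then (some p.2, PySem.Str.len p.1) else st) (none, 0)).2)) := by
  induction l using List.reverseRecOn with
  | nil => exact ⟨le_refl 0, by simp, Or.inl ⟨rfl, by simp [PySem.List.sorted], rfl⟩⟩
  | append_singleton l p ih =>
    obtain ⟨h0, hub, hdisj⟩ := ih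
    set st := l.foldl (fun (st : Option String × Int) p =>
        if PySem.Str.isIn p.1 nl && decide (st.2 < PySem.Str.len p.1)
        then (some p.2, PySem.Str.len p.1) else st) (none, 0) with hst
    have hsortS : (PySem.List.sorted l (fun kv => -(PySem.Str.len kv.1)) false).Pairwise
        (fun a b => -(PySem.Str.len a.1) ≤ -(PySem.Str.len b.1)) :=
      PySem.List.sorted_pairwise l (fun kv => -(PySem.Str.len kv.1))
    have hubS : ∀ q ∈ PySem.List.sorted l (fun kv => -(PySem.Str.len kv.1)) false,
        (decide (0 < PySem.Str.len q.1) && PySem.Str.isIn q.1 nl) = true →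
        PySem.Str.len q.1 ≤ st.2 := by
      intro q hq hqm
      exact hub q ((PySem.List.mem_sorted l _ false q).mp hq) hqm
    have hfound : PySem.Str.isIn p.1 nl = true → 0 < PySem.Str.len p.1 →
        PySem.Str.len p.1 ≤ st.2 →
        ∃ q, (PySem.List.sorted l (fun kv => -(PySem.Str.len kv.1)) false).find?
          (fun r => decide (0 < PySem.Str.len r.1) && PySem.Str.isIn r.1 nl) = some q ∧
          PySem.Str.len p.1 ≤ PySem.Str.len q.1 := by
      intro hm hp0 hle
      rcases hdisj with ⟨_, _, hz⟩ | ⟨q, _, _, hfq, hlq⟩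
      · omega
      · exact ⟨q, hfq, by omega⟩
    have hfoldl : (l ++ [p]).foldl (fun (st : Option String × Int) p =>
        if PySem.Str.isIn p.1 nl && decide (st.2 < PySem.Str.len p.1)
        then (some p.2, PySem.Str.len p.1) else st) (none, 0)
        = if PySem.Str.isIn p.1 nl && decide (st.2 < PySem.Str.len p.1)
          then (some p.2, PySem.Str.len p.1) else st := by
      rw [List.foldl_append, List.foldl_cons, List.foldl_nil, ← hst]
    have hsorted : PySem.List.sorted (l ++ [p]) (fun kv => -(PySem.Str.len kv.1)) false
        = PySem.List.insertBy (fun a b => decide (-(PySem.Str.len a.1) < -(PySem.Str.len b.1))) p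
            (PySem.List.sorted l (fun kv => -(PySem.Str.len kv.1)) false) := by
      rw [PySem.List.sorted_eq_foldl_insertBy, PySem.List.sorted_eq_foldl_insertBy,
          List.foldl_append, List.foldl_cons, List.foldl_nil]
    have hstep := tdn_find_insertBy nl p st.2 h0 _ hsortS hubS hfound
    by_cases hc : PySem.Str.isIn p.1 nl = true ∧ st.2 < PySem.Str.len p.1
    · have hcb : (PySem.Str.isIn p.1 nl && decide (st.2 < PySem.Str.len p.1)) = true := by
        rw [Bool.and_eq_true]; exact ⟨hc.1, decide_eq_true hc.2⟩
      rw [hfoldl, if_pos hcb]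
      refine ⟨tdn_len_nonneg p.1, ?_, Or.inr ⟨p, by simp, rfl, ?_, rfl⟩⟩
      · intro q hq hqm
        rcases List.mem_append.mp hq with h | h
        · have := hub q h hqm; omega
        · simp at h; rw [h]
      · rw [hsorted, hstep, if_pos hc]
    · have hcb : (PySem.Str.isIn p.1 nl && decide (st.2 < PySem.Str.len p.1)) = false := by
        rw [Bool.and_eq_false_iff]
        by_cases hm : PySem.Str.isIn p.1 nl = true
        · right; simp only [decide_eq_false_iff_not]; intro h; exact hc ⟨hm, h⟩
        · left; simpa using hm
      rw [hfoldl, if_neg (by rw [hcb]; exact Bool.false_ne_true)]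
      refine ⟨h0, ?_, ?_⟩
      · intro q hq hqm
        rcases List.mem_append.mp hq with h | h
        · exact hub q h hqm
        · simp only [List.mem_singleton] at h; subst h
          rw [Bool.and_eq_true, decide_eq_true_eq] at hqm
          by_contra hlt
          exact hc ⟨hqm.2, by omega⟩
      · rw [hsorted, hstep, if_neg hc]
        rcases hdisj with ⟨ha, hb, hz⟩ | ⟨q, hqm, ha, hb, hl⟩
        · exact Or.inl ⟨ha, hb, hz⟩
        · exact Or.inr ⟨q, List.mem_append_left _ hqm, ha, hb, hl⟩

-- ===== VERDICT (by name: the statement is the Claim_ definition above) =====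
theorem translate_deck_name_spec : Claim_equal_translate_deck_name := by
  unfold Claim_equal_translate_deck_name
  intro name archetypes _ hpre
  unfold Spec_translate_deck_name translate_deck_name translate_deck_name_alt
  by_cases h1 : (name = "" || archetypes.isEmpty) = true
  · rw [if_pos h1, if_pos h1]
  · rw [if_neg h1, if_neg h1]
    dsimp only
    set nl := PySem.Str.strip (PySem.Str.lower name) with hnl
    set d := PySem.Dict.ofList archetypes with hd
    by_cases h2 : d.contains nl = true
    · rw [if_pos h2, if_pos h2]
    · rw [if_neg h2, if_neg h2]
      obtain ⟨_, _, hdisj⟩ := tdn_inv nl d.items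
      rcases hdisj with ⟨ha, hb, _⟩ | ⟨q, hqm, ha, hb, _⟩
      · rw [ha, hb]
      · rw [ha, hb]
        have hqp := List.find?_some hb
        simp only [Bool.and_eq_true, decide_eq_true_eq] at hqp
        have hv : q.2 ≠ "" :=
          hpre q (tdn_mem_items_ofList archetypes q hqm)
            (tdn_ne_empty_of_len_pos q.1 hqp.1) hqp.2
        simp [hv]
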